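-- pv_equiv track=rewrite | github.com/nlvegan/verenigingen | scripts/security/batch_secure_apis.py | classify_function_type
-- ===== SOURCE A (Python) =====
-- from typing import Any, Dict, List, Tuple
--
-- def classify_function_type(function_name: str, file_path: str) -> Tuple[str, str]:
--     """Classify function to determine appropriate security decorator"""
--
--     # Financial/Payment functions
--     if any(
--         keyword in function_name.lower()
--         for keyword in ["payment", "sepa", "financial", "invoice", "billing", "mandate"]
--     ):
--         return "critical_api", "OperationType.FINANCIAL"
--
--     # Admin functions
--     if any(
--         keyword in function_name.lower() for keyword in ["admin", "config", "system", "workspace", "security"]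
--     ):
--         return "critical_api", "OperationType.ADMIN"
--
--     # Member data functions
--     if any(keyword in function_name.lower() for keyword in ["member", "customer", "user", "profile"]):
--         return "high_security_api", "OperationType.MEMBER_DATA"
--
--     # Debug/Test functions (low security)
--     if any(
--         keyword in function_name.lower() for keyword in ["debug", "test_", "validate_", "check_", "monitor"]
--     ):
--         return "standard_api", "OperationType.UTILITY"
--
--     # Performance/Management functions
--     if any(
--         keyword in function_name.lower()
--         for keyword in ["performance", "job_", "status", "coverage", "measurement"]
--     ):
--         return "standard_api", "OperationType.UTILITY"
--
--     # Reporting functions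
--     if any(keyword in function_name.lower() for keyword in ["report", "analytics", "dashboard"]):
--         return "standard_api", "OperationType.REPORTING"
--
--     # Default to standard security for other functions
--     return "standard_api", "OperationType.UTILITY"
-- ===== SOURCE B (Python) =====
-- _GROUPS = [
--     (["payment", "sepa", "financial", "invoice", "billing", "mandate"],
--      ("critical_api", "OperationType.FINANCIAL")),
--     (["admin", "config", "system", "workspace", "security"],
--      ("critical_api", "OperationType.ADMIN")),
--     (["member", "customer", "user", "profile"],
--      ("high_security_api", "OperationType.MEMBER_DATA")),
--     (["debug", "test_", "validate_", "check_", "monitor"],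
--      ("standard_api", "OperationType.UTILITY")),
--     (["performance", "job_", "status", "coverage", "measurement"],
--      ("standard_api", "OperationType.UTILITY")),
--     (["report", "analytics", "dashboard"],
--      ("standard_api", "OperationType.REPORTING")),
-- ]
--
-- # One flat list of (keyword, priority): the rule index is the keyword's priority.
-- _RANKED = [(kw, rank) for rank, (kws, _res) in enumerate(_GROUPS) for kw in kws]
-- # Results indexed by priority; index len(_GROUPS) is the default.
-- _RESULTS = [res for _kws, res in _GROUPS] + [("standard_api", "OperationType.UTILITY")]
--
--
-- def classify_function_type(function_name, file_path):
--     # Scan ALL keywords once, keeping the minimum priority that matches;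
--     # the answer is the result at that minimum priority (default if none match).
--     name = function_name.lower()
--     best = len(_GROUPS)
--     for kw, rank in _RANKED:
--         if rank < best and kw in name:
--             best = rank
--     return _RESULTS[best]
-- ===== Notes on version B (the rewrite author's own statement) =====
-- stated objective: alternative
-- what changed: Replaces the first-match if-chain of per-group any() scans with a single exhaustive pass over one flat (keyword, priority) list that accumulates the minimum matching priority, then indexes a result table by that minimum; correct because the first matching branch is exactly the minimal matching priority.
import Mathlib
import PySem

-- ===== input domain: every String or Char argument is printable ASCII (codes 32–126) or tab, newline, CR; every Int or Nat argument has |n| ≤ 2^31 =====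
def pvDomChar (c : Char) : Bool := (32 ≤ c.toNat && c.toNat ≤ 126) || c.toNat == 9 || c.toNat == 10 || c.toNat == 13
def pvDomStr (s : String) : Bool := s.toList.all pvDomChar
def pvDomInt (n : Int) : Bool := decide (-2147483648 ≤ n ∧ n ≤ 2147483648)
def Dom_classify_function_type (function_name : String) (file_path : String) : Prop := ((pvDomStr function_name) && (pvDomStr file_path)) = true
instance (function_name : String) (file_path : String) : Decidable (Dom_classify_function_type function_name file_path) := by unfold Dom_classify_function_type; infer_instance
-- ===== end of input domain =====

-- B replaces A's first-match if-chain with one exhaustive pass over a flat (keyword, priority)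
-- list keeping the minimum matching priority, then indexes a result table (alternative decomposition).


-- ===== PORT A =====
def classify_function_type (function_name : String) (file_path : String) : String × String :=
  if ["payment", "sepa", "financial", "invoice", "billing", "mandate"].any
      (fun kw => PySem.Str.isIn kw (PySem.Str.lower function_name)) then
    ("critical_api", "OperationType.FINANCIAL")
  else if ["admin", "config", "system", "workspace", "security"].any
      (fun kw => PySem.Str.isIn kw (PySem.Str.lower function_name)) then
    ("critical_api", "OperationType.ADMIN")
  else if ["member", "customer", "user", "profile"].any
      (fun kw => PySem.Str.isIn kw (PySem.Str.lower function_name)) then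
    ("high_security_api", "OperationType.MEMBER_DATA")
  else if ["debug", "test_", "validate_", "check_", "monitor"].any
      (fun kw => PySem.Str.isIn kw (PySem.Str.lower function_name)) then
    ("standard_api", "OperationType.UTILITY")
  else if ["performance", "job_", "status", "coverage", "measurement"].any
      (fun kw => PySem.Str.isIn kw (PySem.Str.lower function_name)) then
    ("standard_api", "OperationType.UTILITY")
  else if ["report", "analytics", "dashboard"].any
      (fun kw => PySem.Str.isIn kw (PySem.Str.lower function_name)) then
    ("standard_api", "OperationType.REPORTING")
  else
    ("standard_api", "OperationType.UTILITY")

-- ===== PORT B =====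
def pvGroups : List (List String × (String × String)) :=
  [ (["payment", "sepa", "financial", "invoice", "billing", "mandate"],
     ("critical_api", "OperationType.FINANCIAL")),
    (["admin", "config", "system", "workspace", "security"],
     ("critical_api", "OperationType.ADMIN")),
    (["member", "customer", "user", "profile"],
     ("high_security_api", "OperationType.MEMBER_DATA")),
    (["debug", "test_", "validate_", "check_", "monitor"],
     ("standard_api", "OperationType.UTILITY")),
    (["performance", "job_", "status", "coverage", "measurement"],
     ("standard_api", "OperationType.UTILITY")),
    (["report", "analytics", "dashboard"],
     ("standard_api", "OperationType.REPORTING")) ]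

-- _RANKED = [(kw, rank) for rank, (kws, _res) in enumerate(_GROUPS) for kw in kws]
def pvRanked : List (String × Int) :=
  (PySem.List.enumerate pvGroups).flatMap (fun p => p.2.1.map (fun kw => (kw, p.1)))

-- _RESULTS = [res for _kws, res in _GROUPS] + [default]
def pvResults : List (String × String) :=
  pvGroups.map (fun g => g.2) ++ [("standard_api", "OperationType.UTILITY")]

def classify_function_type_alt (function_name : String) (file_path : String) : String × String :=
  let name := PySem.Str.lower function_name
  let best : Int := pvRanked.foldl
    (fun b p => if p.2 < b ∧ PySem.Str.isIn p.1 name = true then p.2 else b)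
    (pvGroups.length : Int)
  -- _RESULTS[best]: exact, since 0 ≤ best ≤ 6 < len(_RESULTS) = 7 always
  (PySem.List.pyGet? pvResults best).getD ("", "")

-- ===== PRECONDITION & SPEC =====
def Spec_classify_function_type (function_name : String) (file_path : String) (out : String × String) : Prop := out = classify_function_type_alt function_name file_path
instance (function_name : String) (file_path : String) (out : String × String) : Decidable (Spec_classify_function_type function_name file_path out) := by unfold Spec_classify_function_type; infer_instance

-- ===== CLAIM (what is proved, stated in full; the proofs are below) =====
def Claim_equal_classify_function_type : Prop := ∀ (function_name : String) (file_path : String), Dom_classify_function_type function_name file_path → Spec_classify_function_type function_name file_path (classify_function_type function_name file_path)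

-- ===== LEMMAS AND PROOFS =====

-- folding B's min-accumulator over one constant-rank group takes b to r iff some keyword
-- of the group matches and r < b, else leaves b unchanged
theorem pv_fold_group (kws : List String) (r : Int) (name : String) (b : Int) :
    (kws.map (fun kw => (kw, r))).foldl
      (fun b p => if p.2 < b ∧ PySem.Str.isIn p.1 name = true then p.2 else b) b
    = if r < b ∧ kws.any (fun kw => PySem.Str.isIn kw name) = true then r else b := by
  induction kws generalizing b with
  | nil => simp
  | cons k rest ih =>
    simp only [List.map_cons, List.foldl_cons, List.any_cons, ih]
    rcases Bool.eq_false_or_eq_true (PySem.Str.isIn k name) with hm | hm <;>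
      simp only [hm] <;> by_cases hr : r < b <;> simp [hr]

theorem classify_function_type_spec : Claim_equal_classify_function_type := by
  intro fn fp _
  unfold Spec_classify_function_type classify_function_type classify_function_type_alt
  have hR : pvRanked =
      (["payment", "sepa", "financial", "invoice", "billing", "mandate"].map (fun kw => (kw, (0 : Int))))
      ++ (["admin", "config", "system", "workspace", "security"].map (fun kw => (kw, (1 : Int))))
      ++ (["member", "customer", "user", "profile"].map (fun kw => (kw, (2 : Int))))
      ++ (["debug", "test_", "validate_", "check_", "monitor"].map (fun kw => (kw, (3 : Int))))
      ++ (["performance", "job_", "status", "coverage", "measurement"].map (fun kw => (kw, (4 : Int))))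
      ++ (["report", "analytics", "dashboard"].map (fun kw => (kw, (5 : Int)))) := by rfl
  rw [hR]
  simp only [List.foldl_append, pv_fold_group]
  cases h0 : ["payment", "sepa", "financial", "invoice", "billing", "mandate"].any
      (fun kw => PySem.Str.isIn kw (PySem.Str.lower fn)) <;>
  cases h1 : ["admin", "config", "system", "workspace", "security"].any
      (fun kw => PySem.Str.isIn kw (PySem.Str.lower fn)) <;>
  cases h2 : ["member", "customer", "user", "profile"].any
      (fun kw => PySem.Str.isIn kw (PySem.Str.lower fn)) <;>
  cases h3 : ["debug", "test_", "validate_", "check_", "monitor"].any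
      (fun kw => PySem.Str.isIn kw (PySem.Str.lower fn)) <;>
  cases h4 : ["performance", "job_", "status", "coverage", "measurement"].any
      (fun kw => PySem.Str.isIn kw (PySem.Str.lower fn)) <;>
  cases h5 : ["report", "analytics", "dashboard"].any
      (fun kw => PySem.Str.isIn kw (PySem.Str.lower fn)) <;> decide
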